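-- pv_equiv track=rewrite | github.com/nengz/UERR | 1/ngram_generator.py | generate_ngrams4str
-- ===== SOURCE A (Python) =====
-- from collections import defaultdict
--
-- def generate_ngrams(tokens, n):
--     """Generate the set of n-grams for a token list"""
--     if n <= 0 or n > len(tokens):
--         return
--
--     for i in range(len(tokens) - n + 1):
--         yield tuple([ str(t) for t in tokens[i:i + n] ])
--
-- def generate_ngrams4str(token_sequence_str):
--     """Generate the entire set of n-grams for a string"""
--     ngrams_dict = defaultdict(set)
--     tokens = token_sequence_str.lower().split()
--     if len(tokens) == 1:
--         ngrams_dict[1].add(tokens[0])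
--     elif len(tokens) > 1:
--         for n in range(1, len(tokens)+1):
--             for ngram in generate_ngrams(tokens, n):
--                 ngrams_dict[n].add(' '.join(ngram))
--     return ngrams_dict
-- ===== SOURCE B (Python) =====
-- from collections import defaultdict
--
-- def generate_ngrams4str(token_sequence_str):
--     """Generate the entire set of n-grams for a string (start-then-extend enumeration)."""
--     ngrams_dict = defaultdict(set)
--     tokens = token_sequence_str.lower().split()
--     for i in range(len(tokens)):
--         parts = []
--         for j in range(i, len(tokens)):
--             parts.append(tokens[j])
--             ngrams_dict[j - i + 1].add(' '.join(parts))
--     return ngrams_dict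
-- ===== Notes on version B (the rewrite author's own statement) =====
-- stated objective: alternative
-- what changed: Replaces the generator helper, the len==1 special case and the length-then-slide re-slicing by a single start-then-extend double loop that maintains the growing n-gram prefix as carried state.
import Mathlib
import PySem

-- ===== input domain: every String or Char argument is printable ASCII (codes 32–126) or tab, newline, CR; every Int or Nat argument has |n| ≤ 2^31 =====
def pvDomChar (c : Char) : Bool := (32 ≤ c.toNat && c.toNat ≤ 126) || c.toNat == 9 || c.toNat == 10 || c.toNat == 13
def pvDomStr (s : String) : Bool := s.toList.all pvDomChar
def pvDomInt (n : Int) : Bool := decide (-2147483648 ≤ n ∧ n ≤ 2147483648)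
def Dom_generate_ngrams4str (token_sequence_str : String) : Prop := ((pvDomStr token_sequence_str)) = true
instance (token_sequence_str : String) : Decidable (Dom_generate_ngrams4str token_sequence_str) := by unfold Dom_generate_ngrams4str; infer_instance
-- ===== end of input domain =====

-- B replaces A's generator helper, len==1 special case and length-then-slide re-slicing by one
-- start-then-extend double loop that carries the growing n-gram prefix as state (objective: alternative).

-- ===== PORT A =====
-- helper generate_ngrams (a generator in Python; its yielded sequence, as a list).
-- str(t) on a str is the identity, ported as `.map (fun t => t)`.
def pvGenerateNgrams (tokens : List String) (n : Int) : List (List String) :=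
  if n ≤ 0 ∨ n > (tokens.length : Int) then []
  else (PySem.List.pyRange 0 ((tokens.length : Int) - n + 1)).map
    (fun i => (PySem.List.slice tokens (some i) (some (i + n))).map (fun t => t))

-- defaultdict access d[n].add(x) is ported as Dict.modify n Set.empty (Set.add · x).
-- tokens[0] is ported with pyGetD: it is only evaluated under the guard len(tokens) == 1,
-- where index 0 is in range, so this is exact.
def generate_ngrams4str (token_sequence_str : String) : List (Int × List String) :=
  let ngrams_dict : PySem.Dict Int (PySem.Set String) := PySem.Dict.empty
  let tokens := PySem.Str.split₀ (PySem.Str.lower token_sequence_str)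
  let ngrams_dict :=
    if tokens.length = 1 then
      ngrams_dict.modify 1 PySem.Set.empty (fun st => PySem.Set.add st (PySem.List.pyGetD tokens 0 ""))
    else if 1 < tokens.length then
      (PySem.List.pyRange 1 ((tokens.length : Int) + 1)).foldl
        (fun d n => (pvGenerateNgrams tokens n).foldl
          (fun d ngram => d.modify n PySem.Set.empty
            (fun st => PySem.Set.add st (PySem.Str.join " " ngram))) d)
        ngrams_dict
    else ngrams_dict
  ngrams_dict.items

-- ===== PORT B =====
-- start-then-extend double loop; the inner loop carries (dict so far, parts so far).
def generate_ngrams4str_alt (token_sequence_str : String) : List (Int × List String) :=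
  let tokens := PySem.Str.split₀ (PySem.Str.lower token_sequence_str)
  ((PySem.List.pyRange 0 (tokens.length : Int)).foldl
    (fun d i =>
      ((PySem.List.pyRange i (tokens.length : Int)).foldl
        (fun (p : PySem.Dict Int (PySem.Set String) × List String) j =>
          let parts := p.2 ++ [PySem.List.pyGetD tokens j ""]
          (p.1.modify (j - i + 1) PySem.Set.empty
            (fun st => PySem.Set.add st (PySem.Str.join " " parts)), parts))
        (d, ([] : List String))).1)
    (PySem.Dict.empty : PySem.Dict Int (PySem.Set String))).items

-- ===== PRECONDITION & SPEC =====
def Spec_generate_ngrams4str (token_sequence_str : String) (out : List (Int × List String)) : Prop := out = generate_ngrams4str_alt token_sequence_str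
instance (token_sequence_str : String) (out : List (Int × List String)) : Decidable (Spec_generate_ngrams4str token_sequence_str out) := by unfold Spec_generate_ngrams4str; infer_instance

-- ===== CLAIM (what is proved, stated in full; the proofs are below) =====
def Claim_equal_generate_ngrams4str : Prop := ∀ (token_sequence_str : String), Dom_generate_ngrams4str token_sequence_str → Spec_generate_ngrams4str token_sequence_str (generate_ngrams4str token_sequence_str)

-- ===== LEMMAS AND PROOFS =====

-- the elementary dict update both programs repeat: d[k].add(v) on a defaultdict(set)
def pvStep (d : PySem.Dict Int (PySem.Set String)) (p : Int × String) : PySem.Dict Int (PySem.Set String) :=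
  d.modify p.1 PySem.Set.empty (fun st => PySem.Set.add st p.2)

-- the n-gram of length k starting at token i
def pvW (ts : List String) (k i : Nat) : String := PySem.Str.join " " ((ts.drop i).take k)

-- the (key, value) update sequences the two programs perform
def pvOpsA (ts : List String) : List (Int × String) :=
  (List.range ts.length).flatMap
    (fun m => (List.range (ts.length - m)).map (fun (i : Nat) => ((m : Int) + 1, pvW ts (m+1) i)))

def pvOpsB (ts : List String) : List (Int × String) :=
  (List.range ts.length).flatMap
    (fun i => (List.range (ts.length - i)).map (fun (t : Nat) => ((t : Int) + 1, pvW ts (t+1) i)))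

-- the common result: keys 1..L in order, d[k] = the distinct k-grams in start order
def pvCanon (ts : List String) : List (Int × PySem.Set String) :=
  (List.range ts.length).map
    (fun (kk : Nat) => ((kk : Int) + 1,
      PySem.Set.ofList ((List.range (ts.length - kk)).map (fun (i : Nat) => pvW ts (kk+1) i))))

def pvGroup (ops : List (Int × String)) : List (Int × PySem.Set String) :=
  (PySem.Set.ofList (ops.map Prod.fst)).map
    (fun k => (k, PySem.Set.ofList ((ops.filter (fun p => p.1 == k)).map Prod.snd)))

theorem ofList_append_singleton {α : Type} [BEq α] [LawfulBEq α] (l : List α) (x : α) :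
    PySem.Set.ofList (l ++ [x]) = PySem.Set.add (PySem.Set.ofList l) x := by
  simp [PySem.Set.ofList_eq_foldl, List.foldl_append]

theorem pvGroup_keys (ops : List (Int × String)) :
    (pvGroup ops).map Prod.fst = PySem.Set.ofList (ops.map Prod.fst) := by
  simp [pvGroup, Function.comp_def]

-- grouping: a foldl of defaultdict(set) updates from empty, characterised
theorem items_foldl_step (ops : List (Int × String)) :
    ((ops.foldl pvStep PySem.Dict.empty).items) = pvGroup ops := by
  induction ops using List.reverseRecOn with
  | nil => simp [pvGroup]; rfl
  | append_singleton xs p ih =>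
    obtain ⟨k, v⟩ := p
    rw [List.foldl_append]
    simp only [List.foldl_cons, List.foldl_nil]
    set d := xs.foldl pvStep PySem.Dict.empty with hd
    have hkeys : d.keys = PySem.Set.ofList (xs.map Prod.fst) := by
      show d.items.map Prod.fst = _
      rw [ih, pvGroup_keys]
    have hnodup : d.keys.Nodup := by rw [hkeys]; exact PySem.Set.nodup_ofList _
    show (d.modify k PySem.Set.empty (fun st => PySem.Set.add st v)).items = _
    rw [PySem.Dict.modify]
    by_cases hk : k ∈ xs.map Prod.fst
    · have hc : d.contains k = true := by
        rw [PySem.Dict.contains_eq_decide_mem_keys, hkeys]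
        simp [PySem.Set.mem_ofList, hk]
      have hmem : (k, PySem.Set.ofList ((xs.filter (fun p => p.1 == k)).map Prod.snd)) ∈ d.items := by
        rw [ih, pvGroup]
        exact List.mem_map_of_mem ((PySem.Set.mem_ofList _ _).2 hk)
      have hget : d.getD k PySem.Set.empty
          = PySem.Set.ofList ((xs.filter (fun p => p.1 == k)).map Prod.snd) :=
        PySem.Dict.getD_of_mem_items d hmem hnodup _
      rw [PySem.Dict.items_insert_of_contains _ _ hc, ih, hget]
      unfold pvGroup
      have hkeyset : PySem.Set.ofList ((xs ++ [(k, v)]).map Prod.fst)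
          = PySem.Set.ofList (xs.map Prod.fst) := by
        rw [List.map_append]
        simp only [List.map_cons, List.map_nil]
        rw [ofList_append_singleton]
        exact PySem.Set.add_of_mem ((PySem.Set.mem_ofList _ _).2 hk)
      rw [hkeyset, List.map_map]
      apply List.map_congr_left
      intro k' hk'
      by_cases hkk : k' = k
      · subst hkk
        simp only [Function.comp, BEq.rfl, if_pos]
        rw [List.filter_append]
        simp only [List.filter_cons, List.filter_nil]
        rw [if_pos (by simp), List.map_append]
        simp [ofList_append_singleton]
      · simp only [Function.comp]
        rw [if_neg (by simp [hkk]), List.filter_append]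
        simp [Ne.symm hkk]
    · have hc : d.contains k = false := by
        rw [PySem.Dict.contains_eq_decide_mem_keys, hkeys]
        simp [PySem.Set.mem_ofList, hk]
      have hget : d.getD k PySem.Set.empty = PySem.Set.empty :=
        PySem.Dict.getD_of_not_contains d _ hc
      rw [PySem.Dict.items_insert_of_not_contains _ _ hc, ih, hget]
      unfold pvGroup
      have hkeyset : PySem.Set.ofList ((xs ++ [(k, v)]).map Prod.fst)
          = PySem.Set.ofList (xs.map Prod.fst) ++ [k] := by
        rw [List.map_append]
        simp only [List.map_cons, List.map_nil]
        rw [ofList_append_singleton]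
        exact PySem.Set.add_of_not_mem (by simp [PySem.Set.mem_ofList, hk])
      rw [hkeyset, List.map_append]
      congr 1
      · apply List.map_congr_left
        intro k' hk'
        have hkk : k' ≠ k := by
          intro h; subst h
          exact hk ((PySem.Set.mem_ofList _ _).1 hk')
        rw [List.filter_append]
        simp [Ne.symm hkk]
      · have hfil : xs.filter (fun p => p.1 == k) = [] := by
          rw [List.filter_eq_nil_iff]
          intro p hp
          simp only [beq_iff_eq]
          intro h
          exact hk (h ▸ List.mem_map_of_mem hp)
        simp only [List.map_cons, List.map_nil, List.filter_append, hfil, List.nil_append,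
          List.filter_cons, beq_self_eq_true, if_pos, List.filter_nil]
        simp [PySem.Set.ofList, PySem.Set.add, PySem.Set.empty]

theorem pyRange_add (a : Int) (n : Nat) :
    PySem.List.pyRange a (a + n) = (List.range n).map (fun k : Nat => a + (k : Int)) := by
  unfold PySem.List.pyRange
  rcases Nat.eq_zero_or_pos n with h | h
  · subst h; simp
  · rw [if_neg (by omega)]
    have : a < a + (n : Int) := by omega
    rw [if_pos (by omega)]
    have hc : ((a + (n : Int) - a + 1 - 1) / 1).toNat = n := by omega
    rw [hc]
    simp only [if_pos this, one_mul]

theorem foldl_nested {α β δ : Type} (l : List α) (g : α → List β) (step : δ → β → δ) (init : δ) :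
    l.foldl (fun d x => (g x).foldl step d) init = (l.flatMap g).foldl step init := by
  induction l generalizing init with
  | nil => rfl
  | cons a t ih => simp [List.flatMap_cons, List.foldl_append, ih]

theorem innerB (ts : List String) (i : Nat) (n : Nat) :
    ∀ (c : Nat) (d : PySem.Dict Int (PySem.Set String)), ts.length - (i + c) = n → i + c ≤ ts.length →
    ((PySem.List.pyRange ((i : Int) + (c : Int)) (ts.length : Int)).foldl
        (fun (p : PySem.Dict Int (PySem.Set String) × List String) j =>
          let parts := p.2 ++ [PySem.List.pyGetD ts j ""]
          (p.1.modify (j - (i : Int) + 1) PySem.Set.empty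
            (fun st => PySem.Set.add st (PySem.Str.join " " parts)), parts))
        (d, (ts.drop i).take c)).1
      = ((List.range n).map
          (fun t => (((c + t : Nat) : Int) + 1, pvW ts (c + t + 1) i))).foldl pvStep d := by
  induction n with
  | zero =>
    intro c d hn hle
    have h0 : (i : Int) + c = (ts.length : Int) := by omega
    have h1 := pyRange_add ((ts.length : Int)) 0
    simp only [Nat.cast_zero, add_zero, List.range_zero, List.map_nil] at h1
    rw [h0, h1]
    simp
  | succ n ih =>
    intro c d hn hle
    have hlt : (i : Int) + c < (ts.length : Int) := by omega
    rw [PySem.List.pyRange_one_cons hlt]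
    rw [List.foldl_cons]
    simp only []
    have hparts : (ts.drop i).take c ++ [PySem.List.pyGetD ts ((i : Int) + c) ""]
        = (ts.drop i).take (c+1) := by
      have h1 : PySem.List.pyGetD ts ((i : Int) + c) "" = ts.getD (i+c) "" := by
        have : (i : Int) + c = ((i + c : Nat) : Int) := by push_cast; ring
        rw [this, PySem.List.pyGetD_natCast]
      have hclen : c < (ts.drop i).length := by simp; omega
      rw [h1, List.take_add_one]
      congr 1
      have : (ts.drop i)[c]? = some ((ts.drop i)[c]'hclen) := List.getElem?_eq_getElem hclen
      rw [this]
      simp [List.getElem_drop, List.getD]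
      rw [List.getElem?_eq_getElem (by omega : i + c < ts.length)]
      simp
    have hkey : (i : Int) + c - i + 1 = (c : Int) + 1 := by ring
    rw [hparts, hkey]
    have hIH := ih (c+1) (d.modify ((c : Int) + 1) PySem.Set.empty
      (fun st => PySem.Set.add st (PySem.Str.join " " ((ts.drop i).take (c+1))))) (by omega) (by omega)
    have hc1 : (i : Int) + ((c+1 : Nat) : Int) = (i : Int) + c + 1 := by push_cast; ring
    rw [hc1] at hIH
    rw [hIH]
    rw [List.range_succ_eq_map, List.map_cons, List.foldl_cons, List.map_map]
    congr 1
    apply List.map_congr_left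
    intro t ht
    simp only [Function.comp, Nat.succ_eq_add_one]
    have h2 : c + 1 + t = c + (t + 1) := by omega
    rw [h2]

theorem foldl_add_of_subset {α : Type} [BEq α] [LawfulBEq α] :
    ∀ (xs : List α) (s : PySem.Set α), (∀ x ∈ xs, x ∈ s) → xs.foldl PySem.Set.add s = s := by
  intro xs
  induction xs with
  | nil => intro s _; rfl
  | cons x t ih =>
    intro s h
    rw [List.foldl_cons, PySem.Set.add_of_mem (h x (by simp))]
    exact ih s (fun y hy => h y (by simp [hy]))

theorem ofList_flatMap_const (g : Nat → Int) :
    ∀ (l : List Nat) (f : Nat → List Int), (l.map g).Nodup →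
      (∀ a ∈ l, f a ≠ [] ∧ ∀ x ∈ f a, x = g a) →
      PySem.Set.ofList (l.flatMap f) = l.map g := by
  intro l
  induction l using List.reverseRecOn with
  | nil => intro f _ _; rfl
  | append_singleton init a ih =>
    intro f hnd hf
    rw [List.flatMap_append]
    have hone : List.flatMap f [a] = f a := by simp
    rw [hone, PySem.Set.ofList_eq_foldl, List.foldl_append, ← PySem.Set.ofList_eq_foldl]
    rw [List.map_append] at hnd
    have hnd' : (init.map g).Nodup := (List.nodup_append.mp hnd).1
    rw [ih f hnd' (fun b hb => hf b (by simp [hb]))]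
    obtain ⟨x, rest, hcons⟩ : ∃ x rest, f a = x :: rest := by
      rcases hfa : f a with _ | ⟨x, rest⟩
      · exact absurd hfa (hf a (by simp)).1
      · exact ⟨x, rest, rfl⟩
    rw [hcons, List.foldl_cons]
    have hx : x = g a := (hf a (by simp)).2 x (by rw [hcons]; simp)
    have hga : g a ∉ init.map g := by
      have := (List.nodup_append.mp hnd).2.2
      intro hmem
      exact this (g a) hmem (g a) (List.mem_singleton_self _) rfl
    rw [hx, PySem.Set.add_of_not_mem hga]
    rw [foldl_add_of_subset rest _ (fun y hy => by
      rw [(hf a (by simp)).2 y (by rw [hcons]; simp [hy])]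
      simp)]
    rw [List.map_append]
    simp

theorem keysA (ts : List String) :
    PySem.Set.ofList ((pvOpsA ts).map Prod.fst)
      = (List.range ts.length).map (fun (kk : Nat) => (kk : Int) + 1) := by
  unfold pvOpsA
  rw [List.map_flatMap]
  have hblocks : ∀ m, ((List.range (ts.length - m)).map
      (fun (i : Nat) => ((m : Int) + 1, pvW ts (m+1) i))).map Prod.fst
      = (List.range (ts.length - m)).map (fun (_ : Nat) => (m : Int) + 1) := by
    intro m; rw [List.map_map]; rfl
  simp only [hblocks]
  apply ofList_flatMap_const (fun m => (m : Int) + 1)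
  · exact List.nodup_range.map (fun a b h => by omega)
  · intro m hm
    rw [List.mem_range] at hm
    constructor
    · simp only [ne_eq, List.map_eq_nil_iff, List.range_eq_nil]
      omega
    · intro x hx
      rw [List.mem_map] at hx
      obtain ⟨_, _, rfl⟩ := hx
      rfl

theorem keysB (ts : List String) :
    PySem.Set.ofList ((pvOpsB ts).map Prod.fst)
      = (List.range ts.length).map (fun (kk : Nat) => (kk : Int) + 1) := by
  unfold pvOpsB
  rw [List.map_flatMap]
  have hblocks : ∀ i, ((List.range (ts.length - i)).map
      (fun (t : Nat) => ((t : Int) + 1, pvW ts (t+1) i))).map Prod.fst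
      = (List.range (ts.length - i)).map (fun (t : Nat) => (t : Int) + 1) := by
    intro i; rw [List.map_map]; rfl
  simp only [hblocks]
  rcases hL : ts.length with _ | n
  · rfl
  · have hnodup : ((List.range (n+1)).map (fun (t : Nat) => (t : Int) + 1)).Nodup :=
      List.nodup_range.map (fun a b h => by omega)
    conv_lhs => rw [List.range_succ_eq_map, List.flatMap_cons]
    simp only [Nat.sub_zero]
    rw [PySem.Set.ofList_eq_foldl, List.foldl_append, ← PySem.Set.ofList_eq_foldl]
    rw [PySem.Set.ofList_eq_self_of_nodup _ hnodup]
    apply foldl_add_of_subset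
    intro x hx
    rw [List.mem_flatMap] at hx
    obtain ⟨i, _, hxi⟩ := hx
    rw [List.mem_map] at hxi
    obtain ⟨t, ht, rfl⟩ := hxi
    rw [List.mem_range] at ht
    exact List.mem_map.mpr ⟨t, List.mem_range.mpr (by omega), rfl⟩

theorem flatMap_ite_singleton {α : Type} (h : Nat → α) (p : Nat → Bool) :
    ∀ l : List Nat, l.flatMap (fun x => if p x then [h x] else []) = (l.filter p).map h := by
  intro l
  induction l with
  | nil => rfl
  | cons x t ih =>
    rw [List.flatMap_cons, ih, List.filter_cons]
    by_cases hp : p x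
    · simp [hp]
    · simp [hp]

theorem filter_lt_range (M : Nat) : ∀ L : Nat, M ≤ L →
    (List.range L).filter (fun i => decide (i < M)) = List.range M := by
  intro L
  induction L with
  | zero => intro h; interval_cases M; rfl
  | succ n ih =>
    intro h
    rw [List.range_succ, List.filter_append]
    rcases Nat.lt_or_ge M (n+1) with h1 | h1
    · rw [ih (by omega)]
      have hog1 : ¬ n < M := by omega
      simp [hog1]
    · have hM : M = n + 1 := by omega
      subst hM
      rw [List.filter_eq_self.mpr (fun a ha => by
        rw [List.mem_range] at ha; simp; omega)]
      simp [List.range_succ]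

theorem filter_eq_range (kk : Nat) : ∀ N : Nat,
    (List.range N).filter (fun t => decide (t = kk)) = if kk < N then [kk] else [] := by
  intro N
  induction N with
  | zero => rfl
  | succ n ih =>
    rw [List.range_succ, List.filter_append, ih]
    rcases Nat.lt_trichotomy kk n with h | h | h
    · have e1 : kk < n := by omega
      have e2 : kk < n + 1 := by omega
      have e3 : ¬ n = kk := by omega
      simp [e1, e2, e3]
    · subst h
      simp
    · have e1 : ¬ kk < n := by omega
      have e2 : ¬ kk < n + 1 := by omega
      have e3 : ¬ n = kk := by omega
      simp [e1, e2, e3]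

theorem filterA (ts : List String) (kk : Nat) (hkk : kk < ts.length) :
    ((pvOpsA ts).filter (fun p => p.1 == (kk : Int) + 1)).map Prod.snd
      = (List.range (ts.length - kk)).map (fun (i : Nat) => pvW ts (kk+1) i) := by
  unfold pvOpsA
  rw [List.filter_flatMap]
  have hblock : ∀ m ∈ List.range ts.length,
      ((List.range (ts.length - m)).map (fun (i : Nat) => ((m : Int) + 1, pvW ts (m+1) i))).filter
          (fun p => p.1 == (kk : Int) + 1)
        = if m = kk then (List.range (ts.length - m)).map (fun (i : Nat) => ((m : Int) + 1, pvW ts (m+1) i)) else [] := by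
    intro m _
    rw [List.filter_map]
    by_cases hm : m = kk
    · subst hm
      rw [if_pos rfl]
      congr 1
      apply List.filter_eq_self.mpr
      intro a _
      simp
    · rw [if_neg hm]
      rw [List.filter_eq_nil_iff.mpr (fun a _ => by
        simp only [Function.comp]
        simp
        omega)]
      simp
  rw [List.flatMap_congr hblock]
  have hsingle : ∀ L : Nat, kk < L →
      (List.range L).flatMap (fun (m : Nat) => if m = kk
        then (List.range (ts.length - m)).map (fun (i : Nat) => ((m : Int) + 1, pvW ts (m+1) i)) else [])
      = (List.range (ts.length - kk)).map (fun (i : Nat) => ((kk : Int) + 1, pvW ts (kk+1) i)) := by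
    intro L
    induction L with
    | zero => omega
    | succ n ih =>
      intro hL
      rw [List.range_succ, List.flatMap_append]
      rcases Nat.lt_or_ge kk n with h | h
      · rw [ih h]
        have hog2 : ¬ n = kk := by omega
        simp [hog2]
      · have : kk = n := by omega
        subst this
        rw [List.flatMap_eq_nil_iff.mpr (fun m hm => by
          rw [List.mem_range] at hm
          have e1 : ¬ m = kk := by omega
          simp [e1])]
        simp
  rw [hsingle ts.length hkk, List.map_map]
  rfl

theorem filterB (ts : List String) (kk : Nat) (hkk : kk < ts.length) :
    ((pvOpsB ts).filter (fun p => p.1 == (kk : Int) + 1)).map Prod.snd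
      = (List.range (ts.length - kk)).map (fun (i : Nat) => pvW ts (kk+1) i) := by
  unfold pvOpsB
  rw [List.filter_flatMap]
  have hblock : ∀ i ∈ List.range ts.length,
      ((List.range (ts.length - i)).map (fun (t : Nat) => ((t : Int) + 1, pvW ts (t+1) i))).filter
          (fun p => p.1 == (kk : Int) + 1)
        = if i < ts.length - kk then [((kk : Int) + 1, pvW ts (kk+1) i)] else [] := by
    intro i _
    rw [List.filter_map]
    have hcomp : ((fun p : Int × String => p.1 == (kk : Int) + 1) ∘
        (fun (t : Nat) => ((t : Int) + 1, pvW ts (t+1) i))) = (fun t => decide (t = kk)) := by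
      funext t
      show decide (((t : Int) + 1) = ((kk : Int) + 1)) = decide (t = kk)
      rw [decide_eq_decide]
      omega
    rw [hcomp, filter_eq_range]
    by_cases h : kk < ts.length - i
    · rw [if_pos h, if_pos (by omega)]
      simp
    · rw [if_neg h, if_neg (by omega)]
      simp
  rw [List.flatMap_congr hblock]
  have hconv : (List.range ts.length).flatMap
      (fun i => if i < ts.length - kk then [((kk : Int) + 1, pvW ts (kk+1) i)] else [])
      = ((List.range ts.length).filter (fun i => decide (i < ts.length - kk))).map
          (fun (i : Nat) => ((kk : Int) + 1, pvW ts (kk+1) i)) := by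
    have := flatMap_ite_singleton (fun (i : Nat) => ((kk : Int) + 1, pvW ts (kk+1) i))
      (fun i => decide (i < ts.length - kk)) (List.range ts.length)
    simpa using this
  rw [hconv, filter_lt_range _ _ (by omega), List.map_map]
  rfl

theorem group_opsA (ts : List String) : pvGroup (pvOpsA ts) = pvCanon ts := by
  unfold pvGroup pvCanon
  rw [keysA, List.map_map]
  apply List.map_congr_left
  intro kk hkk
  rw [List.mem_range] at hkk
  simp only [Function.comp]
  rw [filterA ts kk hkk]

theorem group_opsB (ts : List String) : pvGroup (pvOpsB ts) = pvCanon ts := by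
  unfold pvGroup pvCanon
  rw [keysB, List.map_map]
  apply List.map_congr_left
  intro kk hkk
  rw [List.mem_range] at hkk
  simp only [Function.comp]
  rw [filterB ts kk hkk]

theorem foldA (ts : List String) :
    ((PySem.List.pyRange 1 ((ts.length : Int) + 1)).foldl
        (fun d n => (pvGenerateNgrams ts n).foldl
          (fun d ngram => d.modify n PySem.Set.empty
            (fun st => PySem.Set.add st (PySem.Str.join " " ngram))) d)
        PySem.Dict.empty)
      = (pvOpsA ts).foldl pvStep PySem.Dict.empty := by
  rw [show ((ts.length : Int) + 1) = 1 + (ts.length : Int) from by ring,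
    pyRange_add 1 ts.length, List.foldl_map]
  unfold pvOpsA
  rw [← foldl_nested]
  apply PySem.List.foldl_congr_mem
  intro d m hm
  rw [List.mem_range] at hm
  have hgen : pvGenerateNgrams ts (1 + (m : Int))
      = (List.range (ts.length - m)).map (fun i => (ts.drop i).take (m+1)) := by
    unfold pvGenerateNgrams
    rw [if_neg (by omega)]
    have h1 : (ts.length : Int) - (1 + (m : Int)) + 1 = ((ts.length - m : Nat) : Int) := by
      rw [Nat.cast_sub (le_of_lt hm)]; ring
    rw [h1, PySem.List.pyRange_zero_natCast, List.map_map]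
    apply List.map_congr_left
    intro i hi
    rw [List.mem_range] at hi
    simp only [Function.comp]
    have h2 : (i : Int) + (1 + (m : Int)) = ((i + (m+1) : Nat) : Int) := by push_cast; ring
    rw [h2, PySem.List.slice_natCast]
    have h3 : i + (m+1) - i = m + 1 := by omega
    rw [h3]
    simp
  rw [hgen, List.foldl_map, List.foldl_map]
  apply PySem.List.foldl_congr_mem
  intro d' i _
  show d'.modify (1 + (m : Int)) _ _ = d'.modify ((m : Int) + 1) _ _
  rw [show (1 + (m : Int)) = (m : Int) + 1 from by ring]
  rfl

theorem foldB (ts : List String) :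
    ((PySem.List.pyRange 0 (ts.length : Int)).foldl
      (fun d i =>
        ((PySem.List.pyRange i (ts.length : Int)).foldl
          (fun (p : PySem.Dict Int (PySem.Set String) × List String) j =>
            let parts := p.2 ++ [PySem.List.pyGetD ts j ""]
            (p.1.modify (j - i + 1) PySem.Set.empty
              (fun st => PySem.Set.add st (PySem.Str.join " " parts)), parts))
          (d, ([] : List String))).1)
      (PySem.Dict.empty : PySem.Dict Int (PySem.Set String)))
    = (pvOpsB ts).foldl pvStep PySem.Dict.empty := by
  rw [PySem.List.pyRange_zero_natCast, List.foldl_map]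
  unfold pvOpsB
  rw [← foldl_nested]
  apply PySem.List.foldl_congr_mem
  intro d i hi
  rw [List.mem_range] at hi
  have h := innerB ts i (ts.length - i) 0 d (by omega) (by omega)
  simp only [Nat.cast_zero, add_zero, List.take_zero, Nat.zero_add] at h
  rw [h]

-- ===== VERDICT (by name: the statement is the Claim_ definition above) =====
theorem canonA (ts : List String) (h1 : ts.length = 1) :
    (PySem.Dict.empty.modify 1 PySem.Set.empty
        (fun st => PySem.Set.add st (PySem.List.pyGetD ts 0 ""))).items = pvCanon ts := by
  obtain ⟨t, rfl⟩ := List.length_eq_one_iff.mp h1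
  rw [PySem.Dict.modify]
  rw [PySem.Dict.items_insert_of_not_contains _ _ (by rfl)]
  have hget : PySem.List.pyGetD [t] (0 : Int) "" = t := by
    simp [PySem.List.pyGetD, PySem.List.pyGet?, PySem.List.pyIdx?]
  have hw : pvW [t] 1 0 = t := by
    simp [pvW, PySem.Str.join]
  unfold pvCanon
  simp [List.range_succ, hget, hw, PySem.Set.ofList, PySem.Set.add, PySem.Set.empty]
  rfl

theorem generate_ngrams4str_spec : Claim_equal_generate_ngrams4str := by
  unfold Claim_equal_generate_ngrams4str
  intro s _
  unfold Spec_generate_ngrams4str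
  simp only [generate_ngrams4str, generate_ngrams4str_alt]
  rw [foldB (PySem.Str.split₀ (PySem.Str.lower s)), items_foldl_step, group_opsB]
  by_cases h1 : (PySem.Str.split₀ (PySem.Str.lower s)).length = 1
  · rw [if_pos h1]
    exact canonA _ h1
  · rw [if_neg h1]
    by_cases h2 : 1 < (PySem.Str.split₀ (PySem.Str.lower s)).length
    · rw [if_pos h2, foldA _, items_foldl_step, group_opsA]
    · rw [if_neg h2]
      have h0 : (PySem.Str.split₀ (PySem.Str.lower s)) = [] := by
        cases hts : (PySem.Str.split₀ (PySem.Str.lower s)) with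
        | nil => rfl
        | cons a l => rw [hts] at h1 h2; simp only [List.length_cons] at h1 h2; omega
      rw [h0]
      rfl
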